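-- pv_equiv track=rewrite | github.com/pypi-data/pypi-mirror-165 | packages/exploration/exploration-0.1.2.tar.gz/exploration-0.1.2/exploration/journal.py | splitDelimitedSuffix
-- ===== SOURCE A (Python) =====
-- from typing import (
--     Optional, List, Tuple, Dict, Union, Literal, Set,
--     get_args, cast, Type
-- )
--
-- def splitDelimitedSuffix(
--
--     content: str,
--     delimiters: str,
-- ) -> Tuple[str, Optional[str]]:
--     """
--     Given a string defining entry content, splits it into true
--     content and another string containing a part surrounded by the
--     specified delimiters (must be a length-2 string). The line must
--     end with the ending delimiter (after stripping whitespace) or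
--     else the second part of the return value will be `None`.
--
--     If the delimiters argument is not a length-2 string or both
--     characters are the same, a `ValueError` will be raised. If
--     mismatched delimiters are encountered, a `JournalParseError` will
--     be raised.
--
--     Whitespace space inside the delimiters will be stripped, as will
--     whitespace at the end of the content if a delimited part is found.
--
--     Examples:
--
--     >>> from exploration import journal as j
--     >>> pf = j.ParseFormat()
--     >>> pf.splitDelimitedSuffix('abc (def)', '()')
--     ('abc', 'def')
--     >>> pf.splitDelimitedSuffix('abc def', '()')
--     ('abc def', None)
--     >>> pf.splitDelimitedSuffix('abc [def]', '()')
--     ('abc [def]', None)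
--     >>> pf.splitDelimitedSuffix('abc [d(e)f]', '()')
--     ('abc [d(e)f]', None)
--     >>> pf.splitDelimitedSuffix(' abc d ( ef )', '()')
--     (' abc d', 'ef')
--     >>> pf.splitDelimitedSuffix(' abc d ( ef ) ', '[]')
--     (' abc d ( ef ) ', None)
--     >>> pf.splitDelimitedSuffix(' abc ((def))', '()')
--     (' abc', '(def)')
--     >>> pf.splitDelimitedSuffix(' (abc)', '()')
--     ('', 'abc')
--     >>> pf.splitDelimitedSuffix(' a(bc )def)', '()')
--     Traceback (most recent call last):
--     ...
--     exploration.journal.JournalParseError...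
--     >>> pf.splitDelimitedSuffix(' abc def', 'd')
--     Traceback (most recent call last):
--     ...
--     ValueError...
--     >>> pf.splitDelimitedSuffix(' abc .def.', '..')
--     Traceback (most recent call last):
--     ...
--     ValueError...
--     """
--     if len(delimiters) != 2:
--         raise ValueError(
--             f"Delimiters must a length-2 string specifying a"
--             f" starting and ending delimiter (got"
--             f" {repr(delimiters)})."
--         )
--     begin = delimiters[0]
--     end = delimiters[1]
--     if begin == end:
--         raise ValueError(
--             f"Delimiters must be distinct (got {repr(delimiters)})."
--         )
--     if not content.rstrip().endswith(end) or begin not in content: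
--         # No requirement present
--         return (content, None)
--     else:
--         # March back cancelling delimiters until we find the
--         # matching one
--         left = 1
--         findIn = content.rstrip()
--         for index in range(len(findIn) - 2, -1, -1):
--             if findIn[index] == end:
--                 left += 1
--             elif findIn[index] == begin:
--                 left -= 1
--                 if left == 0:
--                     break
--
--         if left > 0:
--             raise JournalParseError(
--                 f"Unmatched '{end}' in content:\n{content}"
--             )
--
--         return (content[:index].rstrip(), findIn[index + 1:-1].strip())
--
-- class JournalParseError(ValueError):
--     """
--     Represents a error encountered when parsing a journal.
--     """
--     pass
-- ===== SOURCE B (Python) =====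
-- class JournalParseError(ValueError):
--     """
--     Represents a error encountered when parsing a journal.
--     """
--     pass
--
--
-- def splitDelimitedSuffix(content, delimiters):
--     if len(delimiters) != 2:
--         raise ValueError(
--             f"Delimiters must a length-2 string specifying a"
--             f" starting and ending delimiter (got"
--             f" {repr(delimiters)})."
--         )
--     begin = delimiters[0]
--     end = delimiters[1]
--     if begin == end:
--         raise ValueError(
--             f"Delimiters must be distinct (got {repr(delimiters)})."
--         )
--     findIn = content.rstrip()
--     if not findIn.endswith(end) or begin not in content:
--         # No requirement present
--         return (content, None)
--     # Forward scan: keep a stack of unmatched opener positions,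
--     # ignoring closers that arrive while the stack is empty. The
--     # opener matching the final closer is the stack's top.
--     stack = []
--     for i, c in enumerate(findIn[:-1]):
--         if c == begin:
--             stack.append(i)
--         elif c == end and stack:
--             stack.pop()
--     if not stack:
--         raise JournalParseError(
--             f"Unmatched '{end}' in content:\n{content}"
--         )
--     index = stack[-1]
--     return (content[:index].rstrip(), findIn[index + 1:-1].strip())
-- ===== Notes on version B (the rewrite author's own statement) =====
-- stated objective: alternative
-- what changed: A marches backward from the final closer cancelling delimiters with a counter; B makes a single forward pass keeping a stack of unmatched opener indices and matches the final closer against the stack's top.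
import Mathlib
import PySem

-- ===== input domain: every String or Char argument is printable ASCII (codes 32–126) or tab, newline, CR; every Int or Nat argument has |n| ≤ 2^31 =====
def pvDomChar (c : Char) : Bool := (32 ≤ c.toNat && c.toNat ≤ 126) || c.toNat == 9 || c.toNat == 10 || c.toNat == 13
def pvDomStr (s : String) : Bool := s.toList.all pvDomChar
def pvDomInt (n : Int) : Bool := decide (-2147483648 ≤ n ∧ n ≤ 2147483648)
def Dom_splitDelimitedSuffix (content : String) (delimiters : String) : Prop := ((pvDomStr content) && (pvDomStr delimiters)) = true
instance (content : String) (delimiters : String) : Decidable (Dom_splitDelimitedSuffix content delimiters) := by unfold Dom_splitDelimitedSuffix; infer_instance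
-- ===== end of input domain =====

-- B replaces A's backward delimiter-cancelling scan by a single forward pass that keeps a
-- stack of unmatched opener positions (alternative algorithm, same cost).


-- ===== PORT A =====
-- A's backward loop `for index in range(len(findIn)-2, -1, -1)` with the running counter
-- `left`; returns Python's (index, left) as the loop leaves them (index = 0 if the loop
-- ran to exhaustion or never ran — the caller only reads index when left = 0).
def pvLoopA (findIn : List Char) (bg en : Char) (index : Int) (left : Int) : Int × Int :=
  if hneg : index < 0 then (0, left)   -- empty range: loop body never runs
  else
    let c := PySem.List.pyGetD findIn index ' '
    if c = en then
      (if index = 0 then (0, left + 1) else pvLoopA findIn bg en (index - 1) (left + 1))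
    else if c = bg then
      (if left = 1 then (index, 0)     -- `left -= 1; if left == 0: break`
       else if index = 0 then (0, left - 1) else pvLoopA findIn bg en (index - 1) (left - 1))
    else
      (if index = 0 then (0, left) else pvLoopA findIn bg en (index - 1) left)
termination_by index.toNat
decreasing_by all_goals omega

-- Where Python A raises (ValueError on bad delimiters, JournalParseError on an unmatched
-- closer) the port returns (content, none); Pre_ excludes exactly those inputs.
def splitDelimitedSuffix (content : String) (delimiters : String) : String × Option String :=
  let cl := content.toList
  let dl := delimiters.toList
  if dl.length ≠ 2 then (content, none)          -- Python: ValueError (outside Pre_)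
  else
    let bg := dl.getD 0 ' '
    let en := dl.getD 1 ' '
    if bg = en then (content, none)              -- Python: ValueError (outside Pre_)
    else if !(PySem.Chars.endswith (PySem.Chars.rstrip cl) [en]) || !(PySem.Chars.isIn [bg] cl) then
      (content, none)
    else
      let findIn := PySem.Chars.rstrip cl
      let r := pvLoopA findIn bg en ((findIn.length : Int) - 2) 1
      if r.2 > 0 then (content, none)            -- Python: JournalParseError (outside Pre_)
      else
        (String.ofList (PySem.Chars.rstrip (PySem.Chars.slice cl none (some r.1))),
         String.ofList (PySem.Chars.strip (PySem.Chars.slice findIn (some (r.1 + 1)) (some (-1)))))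

-- ===== PORT B =====
-- one forward step of B's stack loop: push an opener's index, pop on a closer if possible
def pvStep (bg en : Char) (st : List Int) (ic : Int × Char) : List Int :=
  if ic.2 = bg then st ++ [ic.1]
  else if ic.2 = en ∧ st ≠ [] then st.dropLast
  else st

def splitDelimitedSuffix_alt (content : String) (delimiters : String) : String × Option String :=
  let cl := content.toList
  let dl := delimiters.toList
  if dl.length ≠ 2 then (content, none)          -- Python: ValueError (outside Pre_)
  else
    let bg := dl.getD 0 ' '
    let en := dl.getD 1 ' '
    if bg = en then (content, none)              -- Python: ValueError (outside Pre_)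
    else
      let findIn := PySem.Chars.rstrip cl
      if !(PySem.Chars.endswith findIn [en]) || !(PySem.Chars.isIn [bg] cl) then
        (content, none)
      else
        let stack := (PySem.List.enumerate (PySem.Chars.slice findIn none (some (-1))) 0).foldl (pvStep bg en) []
        match stack.getLast? with
        | none => (content, none)                -- Python: JournalParseError (outside Pre_)
        | some index =>
          (String.ofList (PySem.Chars.rstrip (PySem.Chars.slice cl none (some index))),
           String.ofList (PySem.Chars.strip (PySem.Chars.slice findIn (some (index + 1)) (some (-1)))))

-- ===== PRECONDITION & SPEC =====
-- Pre_ excludes exactly the inputs where Python A raises: delimiters not a length-2 string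
-- of two distinct characters (ValueError), and contents whose rstripped form ends with the
-- closer and contains the opener but has no opener position with a count-balanced segment
-- up to the final closer (JournalParseError).
def Pre_splitDelimitedSuffix (content : String) (delimiters : String) : Prop :=
  delimiters.toList.length = 2 ∧
  delimiters.toList.getD 0 ' ' ≠ delimiters.toList.getD 1 ' ' ∧
  (PySem.Chars.endswith (PySem.Chars.rstrip content.toList) [delimiters.toList.getD 1 ' '] = false ∨
   PySem.Chars.isIn [delimiters.toList.getD 0 ' '] content.toList = false ∨
   ∃ i < (PySem.Chars.rstrip content.toList).length - 1,
     (PySem.Chars.rstrip content.toList).getD i ' ' = delimiters.toList.getD 0 ' ' ∧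
     (((PySem.Chars.rstrip content.toList).dropLast).drop (i + 1)).count (delimiters.toList.getD 1 ' ')
       = (((PySem.Chars.rstrip content.toList).dropLast).drop (i + 1)).count (delimiters.toList.getD 0 ' '))
instance (content : String) (delimiters : String) : Decidable (Pre_splitDelimitedSuffix content delimiters) := by
  unfold Pre_splitDelimitedSuffix; infer_instance

def pvWitness_splitDelimitedSuffix : String × String := ("abc (def)", "()")

def Spec_splitDelimitedSuffix (content : String) (delimiters : String) (out : String × Option String) : Prop := out = splitDelimitedSuffix_alt content delimiters
instance (content : String) (delimiters : String) (out : String × Option String) : Decidable (Spec_splitDelimitedSuffix content delimiters out) := by unfold Spec_splitDelimitedSuffix; infer_instance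

-- ===== CLAIM (what is proved, stated in full; the proofs are below) =====
def Claim_equal_splitDelimitedSuffix : Prop := ∀ (content : String) (delimiters : String), Dom_splitDelimitedSuffix content delimiters → Pre_splitDelimitedSuffix content delimiters → Spec_splitDelimitedSuffix content delimiters (splitDelimitedSuffix content delimiters)

-- ===== LEMMAS AND PROOFS =====

-- B's stack after the forward pass over the first k characters of findIn
def pvSt (findIn : List Char) (bg en : Char) (k : Nat) : List Int :=
  (PySem.List.enumerate (findIn.take k) 0).foldl (pvStep bg en) []

lemma pvSt_succ (findIn : List Char) (bg en : Char) (k : Nat) (hk : k < findIn.length) :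
    pvSt findIn bg en (k + 1) = pvStep bg en (pvSt findIn bg en k) ((k : Int), findIn[k]) := by
  unfold pvSt
  rw [List.take_add_one]
  have h1 : findIn[k]? = some findIn[k] := List.getElem?_eq_getElem hk
  rw [h1]
  rw [PySem.List.enumerate_append, List.foldl_append]
  simp [List.length_take, Nat.min_eq_left (Nat.le_of_lt hk), PySem.List.enumerate_cons,
        PySem.List.enumerate_nil]

-- core invariant: A's backward scan from index k with counter L succeeds with index j iff
-- j is the L-th entry from the top of B's stack after the forward pass over findIn[:k+1],
-- and leaves a positive leftover counter iff the stack is shorter than L.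
lemma pvScan_stack (findIn : List Char) (bg en : Char) (hne : bg ≠ en)
    (k : Nat) (hk : k < findIn.length) : ∀ (L : Int), 1 ≤ L →
    ((∀ j, (pvSt findIn bg en (k + 1)).reverse[(L - 1).toNat]? = some j →
        pvLoopA findIn bg en (k : Int) L = (j, 0)) ∧
     (((pvSt findIn bg en (k + 1)).length : Int) < L →
        0 < (pvLoopA findIn bg en (k : Int) L).2)) := by
  induction k with
  | zero =>
    intro L hL
    have hS : pvSt findIn bg en 1 = pvStep bg en [] (((0 : Nat) : Int), findIn[0]) := by
      rw [pvSt_succ findIn bg en 0 hk]; rfl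
    rw [pvLoopA]
    simp only [show ¬ (((0 : Nat) : Int) < 0) from by omega, dite_false]
    have hget : PySem.List.pyGetD findIn ((0 : Nat) : Int) ' ' = findIn[0] := by
      rw [PySem.List.pyGetD_natCast, List.getD_eq_getElem _ _ hk]
    rw [hget]
    have h0 : ((0 : Nat) : Int) = 0 := by norm_num
    by_cases hc1 : findIn[0] = en
    · -- closer at index 0: the stack stays empty, the scan returns (0, L + 1)
      have hnil : pvSt findIn bg en 1 = [] := by
        rw [hS]; unfold pvStep; simp [hc1, hne.symm]
      rw [if_pos hc1, if_pos h0]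
      refine ⟨?_, ?_⟩
      · intro j hj; rw [hnil] at hj; simp at hj
      · intro _; simp; omega
    · by_cases hc2 : findIn[0] = bg
      · have hSt : pvSt findIn bg en 1 = [((0 : Nat) : Int)] := by
          rw [hS]; unfold pvStep; simp [hc2]
        rw [if_neg hc1, if_pos hc2]
        refine ⟨?_, ?_⟩
        · intro j hj
          rw [hSt] at hj
          by_cases hL1 : L = 1
          · subst hL1
            simp at hj
            rw [if_pos rfl]
            simp at hj ⊢
            omega
          · exfalso
            have hjlt := (List.getElem?_eq_some_iff.mp hj).1
            simp at hjlt
            omega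
        · intro hlen
          rw [hSt] at hlen; simp at hlen
          rw [if_neg (by omega : ¬ L = 1), if_pos h0]
          simp; omega
      · have hnil : pvSt findIn bg en 1 = [] := by
          rw [hS]; unfold pvStep; simp [hc1, hc2]
        rw [if_neg hc1, if_neg hc2, if_pos h0]
        refine ⟨?_, ?_⟩
        · intro j hj; rw [hnil] at hj; simp at hj
        · intro _; simp; omega
  | succ k ih =>
    intro L hL
    have hk' : k < findIn.length := Nat.lt_of_succ_lt hk
    have ihk := ih hk'
    have hS : pvSt findIn bg en (k + 1 + 1)
        = pvStep bg en (pvSt findIn bg en (k + 1)) (((k + 1 : Nat) : Int), findIn[k + 1]) := by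
      rw [pvSt_succ findIn bg en (k + 1) hk]
    rw [pvLoopA]
    simp only [show ¬ (((k + 1 : Nat) : Int) < 0) from by omega, dite_false]
    have hget : PySem.List.pyGetD findIn ((k + 1 : Nat) : Int) ' ' = findIn[k + 1] := by
      rw [PySem.List.pyGetD_natCast, List.getD_eq_getElem _ _ hk]
    rw [hget]
    have hkz : ¬ (((k + 1 : Nat) : Int) = 0) := by omega
    have hsub : ((k + 1 : Nat) : Int) - 1 = (k : Int) := by omega
    set S := pvSt findIn bg en (k + 1) with hSdef
    by_cases hc1 : findIn[k + 1] = en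
    · -- closer: A recurses with L + 1; B's stack pops (or ignores the closer when empty)
      have hstep : pvSt findIn bg en (k + 1 + 1) = if S ≠ [] then S.dropLast else S := by
        rw [hS]; unfold pvStep; simp [hc1, hne.symm]
      have ihL := ihk (L + 1) (by omega)
      rw [if_pos hc1, if_neg hkz, hsub]
      by_cases hSnil : S = []
      · rw [hstep, if_neg (by simp [hSnil])]
        refine ⟨?_, ?_⟩
        · intro j hj; rw [hSnil] at hj; simp at hj
        · intro _
          apply ihL.2
          rw [hSnil]
          simp only [List.length_nil, Nat.cast_zero]
          omega
      · rw [hstep, if_pos hSnil]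
        have hrev : S.dropLast.reverse = S.reverse.tail := Eq.symm List.tail_reverse
        refine ⟨?_, ?_⟩
        · intro j hj
          apply ihL.1 j
          rw [hrev, List.getElem?_tail] at hj
          have heq : (L - 1).toNat + 1 = (L + 1 - 1).toNat := by omega
          rwa [heq] at hj
        · intro hlen
          apply ihL.2
          have h1 : S.dropLast.length = S.length - 1 := by simp
          have hpos : 0 < S.length := List.length_pos_of_ne_nil hSnil
          omega
    · by_cases hc2 : findIn[k + 1] = bg
      · -- opener: the stack pushes; A breaks at L = 1, else recurses with L - 1
        have hstep : pvSt findIn bg en (k + 1 + 1) = S ++ [((k + 1 : Nat) : Int)] := by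
          rw [hS]; unfold pvStep; simp [hc2]
        rw [if_neg hc1, if_pos hc2]
        by_cases hL1 : L = 1
        · subst hL1
          rw [if_pos rfl]
          refine ⟨?_, ?_⟩
          · intro j hj
            rw [hstep] at hj
            simp at hj
            simp [hj]
          · intro hlen
            exfalso
            rw [hstep] at hlen
            simp at hlen
            omega
        · have ihL := ihk (L - 1) (by omega)
          rw [if_neg hL1, if_neg hkz, hsub]
          refine ⟨?_, ?_⟩
          · intro j hj
            apply ihL.1 j
            rw [hstep, List.reverse_append] at hj
            simp only [List.reverse_singleton, List.singleton_append, List.getElem?_cons] at hj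
            have hne0 : ¬ ((L - 1).toNat = 0) := by omega
            rw [if_neg hne0] at hj
            have heq : (L - 1).toNat - 1 = (L - 1 - 1).toNat := by omega
            rwa [heq] at hj
          · intro hlen
            apply ihL.2
            rw [hstep] at hlen
            simp at hlen
            omega
      · -- ordinary character: both sides unchanged
        have hstep : pvSt findIn bg en (k + 1 + 1) = S := by
          rw [hS]; unfold pvStep; simp [hc1, hc2]
        rw [if_neg hc1, if_neg hc2, if_neg hkz, hsub, hstep]
        exact ihk L hL

-- ===== VERDICT (by name: the statement is the Claim_ definition above) =====
theorem splitDelimitedSuffix_spec : Claim_equal_splitDelimitedSuffix := by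
  intro content delimiters _hdom _hpre
  unfold Spec_splitDelimitedSuffix splitDelimitedSuffix splitDelimitedSuffix_alt
  set cl := content.toList
  set dl := delimiters.toList
  by_cases hlen : dl.length ≠ 2
  · simp [hlen]
  · simp only [hlen, if_false]
    set bg := dl.getD 0 ' '
    set en := dl.getD 1 ' '
    by_cases heq : bg = en
    · simp [heq]
    · simp only [heq, if_false]
      set findIn := PySem.Chars.rstrip cl with hfi
      by_cases hguard : (!(PySem.Chars.endswith findIn [en]) || !(PySem.Chars.isIn [bg] cl)) = true
      · simp [hguard]
      · simp only [hguard, Bool.false_eq_true, if_false]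
        -- findIn ends with en, hence is nonempty
        have hfne : findIn ≠ [] := by
          intro h
          rw [Bool.or_eq_true, not_or] at hguard
          have := hguard.1
          simp [h, PySem.Chars.endswith] at this
        have hn1 : 1 ≤ findIn.length := List.length_pos_of_ne_nil hfne
        have hdrop : PySem.Chars.slice findIn none (some (-1)) = findIn.dropLast := by
          simp [PySem.List.slice_to_neg_one]
        have hstack : (PySem.List.enumerate (PySem.Chars.slice findIn none (some (-1))) 0).foldl (pvStep bg en) []
            = pvSt findIn bg en (findIn.length - 1) := by
          rw [hdrop]
          unfold pvSt
          rw [List.dropLast_eq_take]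
        rw [hstack]
        by_cases hn2 : 2 ≤ findIn.length
        · -- the loop runs: relate it to the stack via the invariant
          have hk : findIn.length - 2 < findIn.length := by omega
          have hmain := pvScan_stack findIn bg en heq (findIn.length - 2) hk 1 (by omega)
          have hidx : ((findIn.length - 2 : Nat) : Int) = (findIn.length : Int) - 2 := by omega
          have hkk : findIn.length - 2 + 1 = findIn.length - 1 := by omega
          rw [hidx, hkk] at hmain
          cases hlast : (pvSt findIn bg en (findIn.length - 1)).getLast? with
          | none =>
            have hnil : pvSt findIn bg en (findIn.length - 1) = [] := by
              exact List.getLast?_eq_none_iff.mp hlast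
            have hpos := hmain.2 (by rw [hnil]; simp)
            simp only [if_pos hpos]
          | some j =>
            have hj : (pvSt findIn bg en (findIn.length - 1)).reverse[(0 : Nat)]? = some j := by
              rw [← List.head?_eq_getElem?]
              rw [List.head?_reverse]
              exact hlast
            have heval := hmain.1 j (by simpa using hj)
            rw [heval]
            simp
        · -- findIn is a single character: the loop never runs (A: left stays 1),
          -- and B's stack over the empty dropLast is empty — both take the raise path
          have hn : findIn.length = 1 := by omega
          have hnil : pvSt findIn bg en (findIn.length - 1) = [] := by
            rw [hn]; unfold pvSt; simp [PySem.List.enumerate_nil]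
          have hneg : ((findIn.length : Int) - 2) < 0 := by omega
          rw [pvLoopA]
          simp [hneg, hnil]
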